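-- pv_equiv track=rewrite | github.com/verdande2/Project-Euler-Python | problem076.py | generalized_pentagonal_number
-- ===== SOURCE A (Python) =====
-- def gen_alternating_sign_integers(lim=10**12):
--     n = 0
--     while n<=lim:
--         yield n
--         if n>0:
--             n = -n
--         elif n<0:
--             n = -n
--             n += 1
--         else:
--             # n == 0
--             n+=1
--
-- def generalized_pentagonal_number(lim=10**12):
--     x = 0
--     for n in gen_alternating_sign_integers(lim):
--
--         # calculate new value of x
--         x = int((3*n**2-n)/2)
--         if x>lim:
--             break
--         else:
--             yield x
-- ===== SOURCE B (Python) =====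
-- def generalized_pentagonal_number(lim=10**12):
--     # Single loop over magnitudes: per step emit both signs' pentagonal numbers.
--     if lim < 0:
--         return
--     yield 0
--     m = 1
--     while True:
--         a = (3 * m * m - m) // 2
--         if a > lim:
--             return
--         yield a
--         b = (3 * m * m + m) // 2
--         if b > lim:
--             return
--         yield b
--         m += 1
-- ===== Notes on version B (the rewrite author's own statement) =====
-- stated objective: simpler
-- what changed: Replaced A's helper generator of alternating-sign integers (fed into a consumer loop) by one direct loop over successive magnitudes that yields the pair of generalized pentagonal numbers of each magnitude per step, with the initial zero guard-yielded before the loop.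
import Mathlib
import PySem

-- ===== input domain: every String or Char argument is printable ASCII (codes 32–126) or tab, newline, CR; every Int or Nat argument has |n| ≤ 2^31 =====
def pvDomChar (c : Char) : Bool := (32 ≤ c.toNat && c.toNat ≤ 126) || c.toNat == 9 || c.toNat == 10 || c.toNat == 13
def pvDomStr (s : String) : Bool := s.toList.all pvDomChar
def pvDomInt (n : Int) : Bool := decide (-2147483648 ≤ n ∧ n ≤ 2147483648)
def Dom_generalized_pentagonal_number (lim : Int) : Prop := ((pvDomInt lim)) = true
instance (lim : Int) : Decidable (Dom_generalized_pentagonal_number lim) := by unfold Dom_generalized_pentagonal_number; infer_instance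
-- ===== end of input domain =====

-- B replaces A's alternating-sign helper generator + consumer loop by one direct loop over
-- magnitudes emitting both pentagonal numbers per step (simpler decomposition, same cost).

-- ===== PORT A =====

-- the state update of gen_alternating_sign_integers (branches in Python's order)
def pyNextA (n : Int) : Int :=
  if 0 < n then -n
  else if n < 0 then -n + 1
  else 1

-- Python generators are ported by fusing gen_alternating_sign_integers into its consumer:
-- state n is the generator's state.  The Nat argument is a totality guard only: at the
-- entry point below it is at least the number of generator steps the loop can take
-- (the generator stops once n = lim + 1, i.e. after at most 2*lim + 2 yields), so the
-- fuel-0 branch is never the one that ends the computation.  int((3*n**2-n)/2) is ported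
-- as exact integer halving, which agrees with Python's float division here because the
-- numerator is even and nonnegative (and magnitudes reached inside Dom are below 2^53).
def pentA_loop (lim : Int) : Nat → Int → List Int
  | 0, _ => []
  | fuel + 1, n =>
    if n ≤ lim then
      let x : Int := (3 * n ^ 2 - n) / 2
      if x > lim then []
      else x :: pentA_loop lim fuel (pyNextA n)
    else []

def generalized_pentagonal_number (lim : Int) : List Int :=
  pentA_loop lim (2 * lim + 4).toNat 0

-- ===== PORT B =====

-- fuel is a totality guard as above: the loop returns via 'a > lim' or 'b > lim' after
-- at most lim + 1 magnitudes starting from m = 1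
def pentB_loop (lim : Int) : Nat → Int → List Int
  | 0, _ => []
  | fuel + 1, m =>
    let a : Int := (3 * m * m - m) / 2
    if a > lim then []
    else
      let b : Int := (3 * m * m + m) / 2
      if b > lim then [a]
      else a :: b :: pentB_loop lim fuel (m + 1)

def generalized_pentagonal_number_alt (lim : Int) : List Int :=
  if lim < 0 then [] else 0 :: pentB_loop lim (lim + 1).toNat 1

-- ===== PRECONDITION & SPEC =====
def Spec_generalized_pentagonal_number (lim : Int) (out : List Int) : Prop := out = generalized_pentagonal_number_alt lim
instance (lim : Int) (out : List Int) : Decidable (Spec_generalized_pentagonal_number lim out) := by unfold Spec_generalized_pentagonal_number; infer_instance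

-- ===== CLAIM (what is proved, stated in full; the proofs are below) =====
def Claim_equal_generalized_pentagonal_number : Prop := ∀ (lim : Int), Dom_generalized_pentagonal_number lim → Spec_generalized_pentagonal_number lim (generalized_pentagonal_number lim)

-- ===== LEMMAS AND PROOFS =====

-- A's value at generator state m is B's a, and at state -m it is B's b
theorem xA_pos (m : Int) : (3 * m ^ 2 - m) / 2 = (3 * m * m - m) / 2 := by ring_nf
theorem xA_neg (m : Int) : (3 * (-m) ^ 2 - (-m)) / 2 = (3 * m * m + m) / 2 := by ring_nf

-- one B step (magnitude m) corresponds to two A steps (generator states m, then -m)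
theorem loops_eq (lim : Int) :
    ∀ (fB fA : Nat) (m : Int), 1 ≤ m → (lim + 1 - m).toNat ≤ fB →
      2 * (lim + 1 - m).toNat + 2 ≤ fA →
      pentA_loop lim fA m = pentB_loop lim fB m := by
  intro fB
  induction fB with
  | zero =>
    intro fA m hm hfB _
    obtain ⟨fA', rfl⟩ : ∃ fA', fA = fA' + 2 := ⟨fA - 2, by omega⟩
    rw [pentA_loop, pentB_loop, if_neg (by omega)]
  | succ fB ih =>
    intro fA m hm hfB hfA
    obtain ⟨fA', rfl⟩ : ∃ fA', fA = fA' + 2 := ⟨fA - 2, by omega⟩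
    rw [pentA_loop, pentB_loop]
    by_cases hml : m ≤ lim
    · rw [if_pos hml]
      simp only [xA_pos]
      by_cases ha : (3 * m * m - m) / 2 > lim
      · rw [if_pos ha, if_pos ha]
      · rw [if_neg ha, if_neg ha]
        have hnx : pyNextA m = -m := by unfold pyNextA; rw [if_pos (by omega)]
        rw [hnx, pentA_loop, if_pos (by omega : -m ≤ lim)]
        simp only [xA_neg]
        by_cases hb : (3 * m * m + m) / 2 > lim
        · rw [if_pos hb, if_pos hb]
        · rw [if_neg hb, if_neg hb]
          have hnx2 : pyNextA (-m) = m + 1 := by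
            unfold pyNextA; rw [if_neg (by omega), if_pos (by omega)]; ring
          rw [hnx2, ih fA' (m + 1) (by omega) (by omega) (by omega)]
    · rw [if_neg hml]
      have ha : (3 * m * m - m) / 2 > lim := by
        -- a = m(3m-1)/2 ≥ m for m ≥ 1, and m > lim here
        obtain ⟨c, hc⟩ : ∃ c : Int, 3 * m * m - m = 2 * c := by
          rcases Int.even_or_odd m with ⟨k, hk⟩ | ⟨k, hk⟩
          · exact ⟨6 * k * k - k, by subst hk; ring⟩
          · exact ⟨6 * k * k + 5 * k + 1, by subst hk; ring⟩
        rw [hc, Int.mul_ediv_cancel_left c (by norm_num)]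
        have h2 : 2 * m ≤ 2 * c := by nlinarith
        omega
      rw [if_pos ha]

-- ===== VERDICT (by name: the statement is the Claim_ definition above) =====
theorem generalized_pentagonal_number_spec : Claim_equal_generalized_pentagonal_number := by
  unfold Claim_equal_generalized_pentagonal_number Spec_generalized_pentagonal_number
  intro lim _
  unfold generalized_pentagonal_number generalized_pentagonal_number_alt
  by_cases hl : lim < 0
  · rw [if_pos hl]
    rcases h : (2 * lim + 4).toNat with _ | f
    · rw [pentA_loop]
    · rw [pentA_loop, if_neg (by omega)]
  · rw [if_neg hl]
    obtain ⟨f, hf⟩ : ∃ f, (2 * lim + 4).toNat = f + 1 := ⟨(2 * lim + 3).toNat, by omega⟩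
    rw [hf, pentA_loop, if_pos (by omega : (0:Int) ≤ lim)]
    rw [if_neg (by omega : ¬ (3 * (0:Int) ^ 2 - 0) / 2 > lim)]
    have h0 : (3 * (0:Int) ^ 2 - 0) / 2 = 0 := by norm_num
    have hx : pyNextA 0 = 1 := by unfold pyNextA; norm_num
    rw [h0, hx, loops_eq lim (lim + 1).toNat f 1 (by omega) (by omega) (by omega)]
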